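-- pv_equiv track=rewrite | github.com/FedorF/leetcode | Problems/Topics/Hashmap/Medium/2405. Optimal Partition of String/solution.py | calc_num_partitions
-- ===== SOURCE A (Python) =====
-- def calc_num_partitions(s: str) -> int:
--     """
--
--     Time complexity: O(n)
--     Space complexity: O(n)
--
--     """
--     cur = set()
--     num = 1
--     for letter in s:
--         if letter in cur:
--             cur = set()
--             num += 1
--
--         cur.add(letter)
--
--     return num
-- ===== SOURCE B (Python) =====
-- def calc_num_partitions(s: str) -> int:
--     # Staged block decomposition: repeatedly strip the longest duplicate-free
--     # prefix (found by a fresh scan each stage) and continue on the remainder.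
--     num = 1
--     while True:
--         seen = set()
--         k = 0
--         while k < len(s) and s[k] not in seen:
--             seen.add(s[k])
--             k += 1
--         if k == len(s):
--             return num
--         s = s[k:]
--         num += 1
-- ===== Notes on version B (the rewrite author's own statement) =====
-- stated objective: alternative
-- what changed: Replaces the single accumulator pass (running set reset in place on a repeat) with a staged block decomposition: an outer loop repeatedly strips the longest duplicate-free prefix, found by a fresh inner scan, and continues on the remaining suffix.
import Mathlib
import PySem

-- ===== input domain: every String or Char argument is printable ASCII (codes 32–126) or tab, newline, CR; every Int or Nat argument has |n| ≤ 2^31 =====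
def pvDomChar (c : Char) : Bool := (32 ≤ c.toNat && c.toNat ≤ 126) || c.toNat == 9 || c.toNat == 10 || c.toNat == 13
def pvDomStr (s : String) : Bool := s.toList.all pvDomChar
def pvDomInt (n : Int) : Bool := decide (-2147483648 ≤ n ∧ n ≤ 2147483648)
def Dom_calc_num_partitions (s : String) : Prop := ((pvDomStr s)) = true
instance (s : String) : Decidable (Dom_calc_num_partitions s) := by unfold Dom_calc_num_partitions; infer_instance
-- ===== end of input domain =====

-- B replaces A's single accumulator pass (set reset on a repeat) with a staged block
-- decomposition: repeatedly strip the longest duplicate-free prefix and continue on the suffix (alternative, same result).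

-- ===== PORT A =====
def pvStepA (st : PySem.Set Char × Int) (letter : Char) : PySem.Set Char × Int :=
  let st' := if PySem.Set.contains st.1 letter then (PySem.Set.empty, st.2 + 1) else st
  (PySem.Set.add st'.1 letter, st'.2)

def calc_num_partitions (s : String) : Int :=
  (s.toList.foldl pvStepA (PySem.Set.empty, 1)).2

-- ===== PORT B =====
-- the `while k < len(s) and s[k] not in seen` scan: returns k, the length of the
-- longest prefix free of duplicates w.r.t. `seen` (index k ↔ drop over the list)
def pvScan (seen : PySem.Set Char) : List Char → Nat
  | [] => 0
  | c :: cs => if PySem.Set.contains seen c then 0 else 1 + pvScan (PySem.Set.add seen c) cs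

lemma pvScan_pos (c : Char) (cs : List Char) : 1 ≤ pvScan PySem.Set.empty (c :: cs) := by
  simp [pvScan, PySem.Set.contains]

def pvGo (num : Int) (l : List Char) : Int :=
  let k := pvScan PySem.Set.empty l
  if k = l.length then num else pvGo (num + 1) (l.drop k)
termination_by l.length
decreasing_by
  cases l with
  | nil => exact absurd rfl (by assumption)
  | cons c cs =>
    have h1 := pvScan_pos c cs
    simp only [List.length_drop, List.length_cons]
    omega

def calc_num_partitions_alt (s : String) : Int := pvGo 1 s.toList

-- ===== PRECONDITION & SPEC =====
def Spec_calc_num_partitions (s : String) (out : Int) : Prop := out = calc_num_partitions_alt s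
instance (s : String) (out : Int) : Decidable (Spec_calc_num_partitions s out) := by unfold Spec_calc_num_partitions; infer_instance

-- ===== CLAIM (what is proved, stated in full; the proofs are below) =====
def Claim_equal_calc_num_partitions : Prop := ∀ (s : String), Dom_calc_num_partitions s → Spec_calc_num_partitions s (calc_num_partitions s)

-- ===== LEMMAS AND PROOFS =====

-- number of cuts A's loop makes, starting from current-partition set `seen`
def pvCuts (seen : PySem.Set Char) : List Char → Int
  | [] => 0
  | c :: cs =>
    if PySem.Set.contains seen c then 1 + pvCuts (PySem.Set.add PySem.Set.empty c) cs
    else pvCuts (PySem.Set.add seen c) cs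

lemma foldA_eq_cuts (l : List Char) : ∀ (cur : PySem.Set Char) (num : Int),
    (l.foldl pvStepA (cur, num)).2 = num + pvCuts cur l := by
  induction l with
  | nil => intro cur num; simp [pvCuts]
  | cons c cs ih =>
    intro cur num
    by_cases h : PySem.Set.contains cur c
    · simp only [List.foldl_cons, pvStepA, pvCuts, h, if_true]
      rw [ih]; ring
    · simp only [List.foldl_cons, pvStepA, pvCuts, h, Bool.false_eq_true, if_false]
      rw [ih]

-- unrolling pvCuts at the first cut found by the scan
lemma cuts_scan (l : List Char) : ∀ seen, pvCuts seen l =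
    if pvScan seen l = l.length then 0
    else 1 + pvCuts PySem.Set.empty (l.drop (pvScan seen l)) := by
  induction l with
  | nil => intro seen; simp [pvScan, pvCuts]
  | cons c cs ih =>
    intro seen
    by_cases h : PySem.Set.contains seen c = true
    · have hm : c ∈ seen := (PySem.Set.contains_iff seen c).mp h
      have h0 : pvScan seen (c :: cs) = 0 := by simp [pvScan, hm]
      have hne : ¬ (pvScan seen (c :: cs) = (c :: cs).length) := by simp [h0]
      rw [if_neg hne, h0, List.drop_zero]
      have hL : pvCuts seen (c :: cs) = 1 + pvCuts (PySem.Set.add PySem.Set.empty c) cs := by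
        simp [pvCuts, hm]
      have hR : pvCuts PySem.Set.empty (c :: cs) = pvCuts (PySem.Set.add PySem.Set.empty c) cs := by
        simp [pvCuts]
      rw [hL, hR]
    · have hm : c ∉ seen := fun hx => h ((PySem.Set.contains_iff seen c).mpr hx)
      have hscan : pvScan seen (c :: cs) = 1 + pvScan (PySem.Set.add seen c) cs := by
        simp [pvScan, hm]
      have hcuts : pvCuts seen (c :: cs) = pvCuts (PySem.Set.add seen c) cs := by
        simp [pvCuts, hm]
      rw [hcuts, hscan, ih (PySem.Set.add seen c)]
      by_cases hk : pvScan (PySem.Set.add seen c) cs = cs.length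
      · rw [if_pos hk, if_pos (show 1 + pvScan (PySem.Set.add seen c) cs = (c :: cs).length by
          simp only [List.length_cons]; omega)]
      · rw [if_neg hk, if_neg (show ¬ (1 + pvScan (PySem.Set.add seen c) cs = (c :: cs).length) by
          simp only [List.length_cons]; omega)]
        rw [Nat.add_comm 1, List.drop_succ_cons]

lemma go_eq_add_cuts : ∀ (n : Nat) (l : List Char), l.length ≤ n → ∀ (num : Int),
    pvGo num l = num + pvCuts PySem.Set.empty l := by
  intro n
  induction n with
  | zero =>
    intro l hl num
    have : l = [] := by cases l <;> simp_all
    subst this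
    simp [pvGo, pvScan, pvCuts]
  | succ m ih =>
    intro l hl num
    rw [pvGo, cuts_scan l PySem.Set.empty]
    by_cases hk : pvScan PySem.Set.empty l = l.length
    · rw [if_pos hk, if_pos hk]; simp
    · rw [if_neg hk, if_neg hk]
      have hlen : (l.drop (pvScan PySem.Set.empty l)).length ≤ m := by
        cases l with
        | nil => exact absurd rfl hk
        | cons c cs =>
          have h1 := pvScan_pos c cs
          simp only [List.length_drop, List.length_cons]
          simp only [List.length_cons] at hl
          omega
      rw [ih _ hlen]
      ring

-- ===== VERDICT (by name: the statement is the Claim_ definition above) =====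
theorem calc_num_partitions_spec : Claim_equal_calc_num_partitions := by
  intro s _
  show calc_num_partitions s = calc_num_partitions_alt s
  unfold calc_num_partitions calc_num_partitions_alt
  rw [foldA_eq_cuts, go_eq_add_cuts s.toList.length s.toList (le_refl _) 1]
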